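-- pv_equiv track=rewrite | github.com/hugospinelli/typetree | typetree/typetree.py | group_to_map
-- ===== SOURCE A (Python) =====
-- def group_to_map(v: list[set[int]]) -> dict[tuple[int, int], int]:
--     """Argument v is a list of indices grouped in sets that map to
--     the same structure in a Sequence tree. Their positions indicate
--     where they map to. Example:
--         branches = [A, B, A, A, C, A, B]
--         unique_branches = [A, B, C]
--         v = [{0, 2, 3, 5}, {1, 6}, {4}]
--     means that A shows in indices v[0] = {0, 2, 3, 5}, B shows in
--     indices v[1] = {1, 6}, and C shows in v[2] = {4}.
--         The return value is a dict of sequential ranges of indices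
--     as keys and their mapping to unique_branches. In the previous
--     case it will return {(0, 1): 0, (1, 2): 1, (2, 4): 0, (4, 5): 2,
--     (5, 6): 0, (6, 7): 1}.
--     """
--     if not v:
--         return {}
--     u: dict[tuple[int, int], int] = {}
--     for k, s in enumerate(v):
--         if not s:
--             continue
--         sv: list[int] = list(sorted(s))
--         su: list[tuple[int, int]] = [(sv[0], sv[0] + 1)]
--         for x in sv[1:]:  # type: int
--             if x == su[-1][1]:
--                 su[-1] = (su[-1][0], x + 1)
--             else:
--                 su.append((x, x + 1))
--         for t in su:  # type: tuple[int, int]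
--             u[t] = k
--     # noinspection PyTypeChecker
--     return dict(sorted(u.items()))
-- ===== SOURCE B (Python) =====
-- def group_to_map(v: list[set[int]]) -> dict[tuple[int, int], int]:
--     # One global sort of (group, index) pairs, a single merge sweep cutting a run
--     # whenever the group changes or the index skips, then one lexicographic sort
--     # of the collected ranges with last-wins insertion.
--     pairs = sorted((k, x) for k, s in enumerate(v) for x in s)
--     ranges = []
--     run = None  # (start, end, group)
--     for k, x in pairs:
--         if run is not None and k == run[2] and x == run[1]:
--             run = (run[0], x + 1, k)
--         else:
--             if run is not None:
--                 ranges.append(((run[0], run[1]), run[2]))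
--             run = (x, x + 1, k)
--     if run is not None:
--         ranges.append(((run[0], run[1]), run[2]))
--     out: dict[tuple[int, int], int] = {}
--     for r, k in sorted(ranges):
--         out[r] = k
--     return out
-- ===== Notes on version B (the rewrite author's own statement) =====
-- stated objective: alternative
-- what changed: Instead of sorting each set separately, building per-set runs into a range-keyed dict with overwrites and sorting the dict items at the end, B sorts all (group, index) pairs once globally, emits every run in a single merge sweep over that order, and resolves duplicate ranges by one last-wins insertion pass over the lexicographically sorted range list.
import Mathlib
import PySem

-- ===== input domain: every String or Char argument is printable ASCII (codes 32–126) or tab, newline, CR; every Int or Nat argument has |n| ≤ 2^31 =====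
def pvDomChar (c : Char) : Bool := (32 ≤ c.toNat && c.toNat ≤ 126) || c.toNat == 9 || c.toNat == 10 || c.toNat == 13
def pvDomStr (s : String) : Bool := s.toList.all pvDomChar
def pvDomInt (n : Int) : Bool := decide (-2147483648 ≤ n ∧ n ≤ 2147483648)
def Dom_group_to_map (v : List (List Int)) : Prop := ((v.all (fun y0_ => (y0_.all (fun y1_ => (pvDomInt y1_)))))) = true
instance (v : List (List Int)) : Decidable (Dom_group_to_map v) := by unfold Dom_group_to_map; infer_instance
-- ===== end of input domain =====

-- B replaces A's per-set sorts, range-keyed dict overwrites and final item sort by one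
-- global sort of (group, index) pairs, a single merge sweep, and one last-wins
-- insertion pass in lexicographic order (objective: alternative).

-- ===== PORT A =====
-- A's inner run loop; `su` is kept head-first (last Python element at the head), so
-- Python's `su[-1] = …` update and `su.append(…)` act on the head; it is reversed back
-- before the dict-insertion loop.
def runStepA (su : List (Int × Int)) (x : Int) : List (Int × Int) :=
  match su with
  | (a, b) :: rest => if x = b then (a, x + 1) :: rest else (x, x + 1) :: (a, b) :: rest
  | [] => [(x, x + 1)]

-- body of A's `for k, s in enumerate(v)` loop
def dictStepA (u : PySem.Dict (Int × Int) Int) (ks : Int × List Int) : PySem.Dict (Int × Int) Int :=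
  if ks.2 = [] then u
  else
    match PySem.List.sorted ks.2 (fun x => x) with
    | [] => u  -- unreachable: sorted of a nonempty list is nonempty
    | h :: t =>
      ((t.foldl runStepA [(h, h + 1)]).reverse).foldl (fun u r => u.insert r ks.1) u

-- `sorted(u.items())` sorts ((a, b), k) tuples lexicographically: the key maps each
-- item into the Lex product order, which is exactly Python's tuple comparison.
def group_to_map (v : List (List Int)) : List (Int × Int × Int) :=
  if v = [] then []
  else
    let u := (PySem.List.enumerate v).foldl dictStepA (PySem.Dict.empty)
    (PySem.List.sorted u.items (fun p => toLex (toLex p.1, p.2))).map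
      (fun p => (p.1.1, p.1.2, p.2))

-- ===== PORT B =====
-- body of B's merge sweep: state = (collected ranges, current open run (start, end, group));
-- a pair (k, x) extends the open run iff the group matches and the index is the run's end.
def scanStepB (st : List ((Int × Int) × Int) × Option (Int × Int × Int)) (kx : Int × Int) :
    List ((Int × Int) × Int) × Option (Int × Int × Int) :=
  match st.2 with
  | some r =>
    if kx.1 = r.2.2 ∧ kx.2 = r.2.1 then (st.1, some (r.1, kx.2 + 1, r.2.2))
    else (st.1 ++ [((r.1, r.2.1), r.2.2)], some (kx.2, kx.2 + 1, kx.1))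
  | none => (st.1, some (kx.2, kx.2 + 1, kx.1))

-- `sorted(…)` on 2-tuples / on ((a, b), k) tuples: keys into the Lex order = Python
-- tuple comparison; the final loop `for r, k in sorted(ranges): out[r] = k` is the
-- fold of dict insertions over the sorted ranges.
def group_to_map_alt (v : List (List Int)) : List (Int × Int × Int) :=
  let pairs := PySem.List.sorted
      ((PySem.List.enumerate v).flatMap (fun ks => ks.2.map (fun x => (ks.1, x))))
      (fun p => toLex p)
  let st := pairs.foldl scanStepB ([], none)
  let ranges : List ((Int × Int) × Int) :=
    match st.2 with
    | some r => st.1 ++ [((r.1, r.2.1), r.2.2)]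
    | none => st.1
  let out := (PySem.List.sorted ranges (fun p => toLex (toLex p.1, p.2))).foldl
      (fun d p => d.insert p.1 p.2) (PySem.Dict.empty : PySem.Dict (Int × Int) Int)
  out.items.map (fun p => (p.1.1, p.1.2, p.2))

-- ===== PRECONDITION & SPEC =====
def Spec_group_to_map (v : List (List Int)) (out : List (Int × Int × Int)) : Prop := out = group_to_map_alt v
instance (v : List (List Int)) (out : List (Int × Int × Int)) : Decidable (Spec_group_to_map v out) := by unfold Spec_group_to_map; infer_instance

-- ===== CLAIM (what is proved, stated in full; the proofs are below) =====
def Claim_equal_group_to_map : Prop := ∀ (v : List (List Int)), Dom_group_to_map v → Spec_group_to_map v (group_to_map v)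

-- ===== LEMMAS AND PROOFS =====

-- Recursive form of A's inner run loop.
def runGo : Int → Int → List Int → List (Int × Int)
  | a, b, [] => [(a, b)]
  | a, b, x :: t => if x = b then runGo a (x + 1) t else (a, b) :: runGo x (x + 1) t

-- Same loop split into (completed runs, still-open run).
def runGoC : Int → Int → List Int → List (Int × Int) × (Int × Int)
  | a, b, [] => ([], (a, b))
  | a, b, x :: t =>
    if x = b then runGoC a (x + 1) t
    else ((a, b) :: (runGoC x (x + 1) t).1, (runGoC x (x + 1) t).2)

-- Recursive form of B's merge sweep (state-passing), items are (group, index) pairs.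
def mergeGoB : Option (Int × Int × Int) → List (Int × Int) → List ((Int × Int) × Int)
  | none, [] => []
  | some r, [] => [((r.1, r.2.1), r.2.2)]
  | none, (k, x) :: t => mergeGoB (some (x, x + 1, k)) t
  | some r, (k, x) :: t =>
      if k = r.2.2 ∧ x = r.2.1 then mergeGoB (some (r.1, x + 1, r.2.2)) t
      else ((r.1, r.2.1), r.2.2) :: mergeGoB (some (x, x + 1, k)) t

def runsOf (s : List Int) : List (Int × Int) :=
  match PySem.List.sorted s (fun x => x) with
  | [] => []
  | h :: t => runGo h (h + 1) t

-- A's per-set contribution to the dict, as a (range, group) list.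
def blockOf (ks : Int × List Int) : List ((Int × Int) × Int) :=
  (runsOf ks.2).map (fun r => (r, ks.1))

-- B's per-set block of sorted (group, index) pairs.
def SBlock (ks : Int × List Int) : List (Int × Int) :=
  (PySem.List.sorted ks.2 (fun x => x)).map (fun x => (ks.1, x))

def lA (v : List (List Int)) : List ((Int × Int) × Int) :=
  (PySem.List.enumerate v).flatMap blockOf

def SB (v : List (List Int)) : List (Int × Int) :=
  (PySem.List.enumerate v).flatMap SBlock

def LPk (v : List (List Int)) : List (Int × Int) :=
  (PySem.List.enumerate v).flatMap (fun ks => ks.2.map (fun x => (ks.1, x)))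

-- last value stored for key c when a (key, value) list is inserted left to right
def lastVal? : List ((Int × Int) × Int) → (Int × Int) → Option Int
  | [], _ => none
  | p :: l, c =>
    match lastVal? l c with
    | some w => some w
    | none => if p.1 = c then some p.2 else none

lemma scanB_eq_mergeGoB (l : List (Int × Int)) :
    ∀ (out : List ((Int × Int) × Int)) (prev : Option (Int × Int × Int)),
    (match (l.foldl scanStepB (out, prev)).2 with
     | some r => (l.foldl scanStepB (out, prev)).1 ++ [((r.1, r.2.1), r.2.2)]
     | none => (l.foldl scanStepB (out, prev)).1) = out ++ mergeGoB prev l := by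
  induction l with
  | nil => intro out prev; cases prev <;> simp [mergeGoB]
  | cons kx t ih =>
    intro out prev
    obtain ⟨k, x⟩ := kx
    cases prev with
    | none => simp only [List.foldl_cons, scanStepB, mergeGoB]; exact ih out _
    | some r =>
      obtain ⟨a, b, g⟩ := r
      by_cases h : k = g ∧ x = b
      · simp only [List.foldl_cons, scanStepB, mergeGoB, if_pos h]; exact ih out _
      · simp only [List.foldl_cons, scanStepB, mergeGoB, if_neg h]
        rw [ih]; simp

lemma foldl_runStepA (t : List Int) :
    ∀ (a b : Int) (rest : List (Int × Int)),
    (t.foldl runStepA ((a, b) :: rest)).reverse = rest.reverse ++ runGo a b t := by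
  induction t with
  | nil => intro a b rest; simp [runGo]
  | cons x t ih =>
    intro a b rest
    by_cases h : x = b
    · simp only [List.foldl_cons, runStepA, if_pos h, runGo, ih]
    · simp only [List.foldl_cons, runStepA, if_neg h, runGo, ih]
      simp

lemma runGo_eq_runGoC : ∀ (t : List Int) (a b : Int),
    runGo a b t = (runGoC a b t).1 ++ [(runGoC a b t).2] := by
  intro t
  induction t with
  | nil => intro a b; simp [runGo, runGoC]
  | cons x t ih =>
    intro a b
    by_cases h : x = b
    · simp only [runGo, runGoC, if_pos h]; exact ih a (x + 1)
    · simp only [runGo, runGoC, if_neg h, List.cons_append]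
      rw [ih x (x + 1)]

lemma mergeGoB_block : ∀ (t : List Int) (a b k : Int) (rest : List (Int × Int)),
    mergeGoB (some (a, b, k)) (t.map (fun x => (k, x)) ++ rest)
      = ((runGoC a b t).1).map (fun r => (r, k))
        ++ mergeGoB (some ((runGoC a b t).2.1, (runGoC a b t).2.2, k)) rest := by
  intro t
  induction t with
  | nil => intro a b k rest; simp [runGoC]
  | cons x t ih =>
    intro a b k rest
    by_cases h : x = b
    · subst h
      simp [mergeGoB, runGoC, ih]
    · simp only [List.map_cons, List.cons_append, mergeGoB, runGoC, if_neg h]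
      rw [if_neg (by tauto)]
      rw [ih x (x + 1) k rest]

lemma mergeGoB_blocks : ∀ (E : List (Int × List Int)) (a b g : Int),
    (∀ ks ∈ E, ks.1 ≠ g) → E.Pairwise (fun p q => p.1 ≠ q.1) →
    mergeGoB (some (a, b, g)) (E.flatMap SBlock) = ((a, b), g) :: E.flatMap blockOf := by
  intro E
  induction E with
  | nil => intro a b g _ _; rfl
  | cons ks E ih =>
    intro a b g hg hP
    rw [List.flatMap_cons, List.flatMap_cons]
    cases hsort : PySem.List.sorted ks.2 (fun x => x) with
    | nil =>
      have h1 : SBlock ks = [] := by unfold SBlock; rw [hsort]; rfl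
      have h2 : blockOf ks = [] := by unfold blockOf runsOf; rw [hsort]; rfl
      rw [h1, h2, List.nil_append, List.nil_append]
      exact ih a b g (fun ks' h => hg ks' (List.mem_cons_of_mem _ h))
        (List.pairwise_cons.mp hP).2
    | cons h t =>
      have h1 : SBlock ks = (ks.1, h) :: t.map (fun x => (ks.1, x)) := by
        unfold SBlock; rw [hsort]; rfl
      have hruns : runsOf ks.2 = runGo h (h + 1) t := by unfold runsOf; rw [hsort]
      have h2 : blockOf ks = ((runGoC h (h + 1) t).1).map (fun r => (r, ks.1))
          ++ [((runGoC h (h + 1) t).2, ks.1)] := by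
        unfold blockOf
        rw [hruns, runGo_eq_runGoC, List.map_append]
        rfl
      rw [h1, List.cons_append]
      have hcond : ¬(ks.1 = g ∧ h = b) := fun hc => hg ks List.mem_cons_self hc.1
      show (if ks.1 = g ∧ h = b then _ else ((a, b), g) :: mergeGoB (some (h, h + 1, ks.1)) _)
          = _
      rw [if_neg hcond, mergeGoB_block t h (h + 1) ks.1 (E.flatMap SBlock),
        ih _ _ ks.1 (fun ks' h' => ((List.pairwise_cons.mp hP).1 ks' h').symm)
          (List.pairwise_cons.mp hP).2,
        h2]
      simp

lemma mergeGoB_SB_aux : ∀ (E : List (Int × List Int)),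
    E.Pairwise (fun p q => p.1 ≠ q.1) →
    mergeGoB none (E.flatMap SBlock) = E.flatMap blockOf := by
  intro E
  induction E with
  | nil => intro _; rfl
  | cons ks E ih =>
    intro hP
    rw [List.flatMap_cons, List.flatMap_cons]
    cases hsort : PySem.List.sorted ks.2 (fun x => x) with
    | nil =>
      have h1 : SBlock ks = [] := by unfold SBlock; rw [hsort]; rfl
      have h2 : blockOf ks = [] := by unfold blockOf runsOf; rw [hsort]; rfl
      rw [h1, h2, List.nil_append, List.nil_append]
      exact ih (List.pairwise_cons.mp hP).2
    | cons h t =>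
      have h1 : SBlock ks = (ks.1, h) :: t.map (fun x => (ks.1, x)) := by
        unfold SBlock; rw [hsort]; rfl
      have hruns : runsOf ks.2 = runGo h (h + 1) t := by unfold runsOf; rw [hsort]
      have h2 : blockOf ks = ((runGoC h (h + 1) t).1).map (fun r => (r, ks.1))
          ++ [((runGoC h (h + 1) t).2, ks.1)] := by
        unfold blockOf
        rw [hruns, runGo_eq_runGoC, List.map_append]
        rfl
      rw [h1, List.cons_append]
      show mergeGoB (some (h, h + 1, ks.1)) _ = _
      rw [mergeGoB_block t h (h + 1) ks.1 (E.flatMap SBlock),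
        mergeGoB_blocks E _ _ ks.1 (fun ks' h' => ((List.pairwise_cons.mp hP).1 ks' h').symm)
          (List.pairwise_cons.mp hP).2,
        h2]
      simp

lemma mergeGoB_SB (v : List (List Int)) : mergeGoB none (SB v) = lA v := by
  exact mergeGoB_SB_aux (PySem.List.enumerate v)
    ((PySem.List.pairwise_lt_enumerate v 0).imp
      (fun {p q} hlt heq => absurd (heq ▸ hlt) (lt_irrefl _)))


-- ---- sorted (group, index) pairs = concatenation of per-set sorted blocks ----

lemma SB_tag_lb (v : List (List Int)) :
    ∀ (s : Int) (p : Int × Int),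
    p ∈ (PySem.List.enumerate v s).flatMap SBlock → s ≤ p.1 := by
  induction v with
  | nil => intro s p h; simp [PySem.List.enumerate_nil] at h
  | cons y v ih =>
    intro s p h
    rw [PySem.List.enumerate_cons, List.flatMap_cons] at h
    rcases List.mem_append.mp h with h1 | h2
    · rcases List.mem_map.mp h1 with ⟨x, -, rfl⟩
      exact le_rfl
    · have := ih (s + 1) p h2
      omega

lemma pairwise_trivial {α : Type} (l : List α) {R : α → α → Prop} (h : ∀ a b, R a b) :
    l.Pairwise R := by
  induction l with
  | nil => exact List.Pairwise.nil
  | cons x l ih => exact List.Pairwise.cons (fun b _ => h x b) ih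

lemma SB_pairwise (v : List (List Int)) :
    ∀ (s : Int),
    ((PySem.List.enumerate v s).flatMap SBlock).Pairwise (fun p q => toLex p ≤ toLex q) := by
  induction v with
  | nil => intro s; simp [PySem.List.enumerate_nil]
  | cons y v ih =>
    intro s
    rw [PySem.List.enumerate_cons, List.flatMap_cons]
    rw [List.pairwise_append]
    refine ⟨?_, ih (s + 1), ?_⟩
    · unfold SBlock
      rw [List.pairwise_map]
      refine (PySem.List.sorted_pairwise y (fun x => x)).imp ?_
      intro a b hle
      exact Prod.Lex.le_iff.mpr (Or.inr ⟨rfl, hle⟩)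
    · intro a ha b hb
      rcases List.mem_map.mp ha with ⟨x, -, rfl⟩
      have hbl := SB_tag_lb v (s + 1) b hb
      refine Prod.Lex.le_iff.mpr (Or.inl ?_)
      show s < b.1
      omega

lemma LPk_perm_SB (v : List (List Int)) : (LPk v).Perm (SB v) := by
  unfold LPk SB
  exact (List.Perm.flatMap_left (PySem.List.enumerate v)
    (fun ks _ => (PySem.List.sorted_perm ks.2 (fun x => x) false).map
      (fun x => (ks.1, x)))).symm

lemma sorted_LPk (v : List (List Int)) :
    PySem.List.sorted (LPk v) (fun p => toLex p) = SB v := by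
  apply PySem.List.eq_of_perm_of_pairwise_le_of_injective
    (fun p : Int × Int => (toLex p : Lex (Int × Int))) toLex.injective
  · exact (PySem.List.sorted_perm (LPk v) (fun p => toLex p) false).trans (LPk_perm_SB v)
  · exact PySem.List.sorted_pairwise (LPk v) (fun p => toLex p)
  · exact SB_pairwise v 0

-- ---- A's dict is the fold of insertions over lA ----

lemma dictStepA_eq (d : PySem.Dict (Int × Int) Int) (ks : Int × List Int) :
    dictStepA d ks = (blockOf ks).foldl (fun d p => d.insert p.1 p.2) d := by
  by_cases hs : ks.2 = []
  · have hb : blockOf ks = [] := by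
      unfold blockOf runsOf; rw [hs]; rfl
    rw [hb]
    unfold dictStepA
    rw [if_pos hs]
    rfl
  · cases hsort : PySem.List.sorted ks.2 (fun x => x) with
    | nil => exact absurd ((PySem.List.sorted_eq_nil_iff ks.2 _ _).mp hsort) hs
    | cons h t =>
      have hsu : (t.foldl runStepA [(h, h + 1)]).reverse = runGo h (h + 1) t := by
        have h0 := foldl_runStepA t h (h + 1) []
        simpa using h0
      have hruns : runsOf ks.2 = runGo h (h + 1) t := by unfold runsOf; rw [hsort]
      have hl : dictStepA d ks
          = (runGo h (h + 1) t).foldl (fun u r => u.insert r ks.1) d := by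
        simp only [dictStepA, hsort, if_neg hs, hsu]
      rw [hl]
      unfold blockOf
      rw [hruns, List.foldl_map]

lemma u_eq (v : List (List Int)) :
    (PySem.List.enumerate v).foldl dictStepA PySem.Dict.empty
      = (lA v).foldl (fun d p => d.insert p.1 p.2) PySem.Dict.empty := by
  unfold lA
  rw [List.foldl_flatMap]
  exact PySem.List.foldl_congr_mem (l := PySem.List.enumerate v) (f := dictStepA)
    (g := fun d ks => (blockOf ks).foldl (fun d p => d.insert p.1 p.2) d)
    (init := PySem.Dict.empty) (fun d ks _ => dictStepA_eq d ks)

-- ---- values along lA are nondecreasing (blocks carry ascending group indices) ----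

lemma lA_tag_lb (v : List (List Int)) :
    ∀ (s : Int) (p : (Int × Int) × Int),
    p ∈ (PySem.List.enumerate v s).flatMap blockOf → s ≤ p.2 := by
  induction v with
  | nil => intro s p h; simp [PySem.List.enumerate_nil] at h
  | cons y v ih =>
    intro s p h
    rw [PySem.List.enumerate_cons, List.flatMap_cons] at h
    rcases List.mem_append.mp h with h1 | h2
    · rcases List.mem_map.mp h1 with ⟨r, -, rfl⟩
      exact le_rfl
    · have := ih (s + 1) p h2
      omega

lemma lA_snd_mono_aux (v : List (List Int)) :
    ∀ (s : Int),
    ((PySem.List.enumerate v s).flatMap blockOf).Pairwise (fun p q => p.2 ≤ q.2) := by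
  induction v with
  | nil => intro s; simp [PySem.List.enumerate_nil]
  | cons y v ih =>
    intro s
    rw [PySem.List.enumerate_cons, List.flatMap_cons, List.pairwise_append]
    refine ⟨?_, ih (s + 1), ?_⟩
    · unfold blockOf
      rw [List.pairwise_map]
      exact pairwise_trivial _ (fun a b => le_rfl)
    · intro a ha b hb
      rcases List.mem_map.mp ha with ⟨r, -, rfl⟩
      have hbl := lA_tag_lb v (s + 1) b hb
      show s ≤ b.2
      omega

lemma lA_snd_mono (v : List (List Int)) : (lA v).Pairwise (fun p q => p.2 ≤ q.2) :=
  lA_snd_mono_aux v 0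

-- ---- dict built by a left-to-right insertion fold ----

lemma get?_foldl_insert :
    ∀ (l : List ((Int × Int) × Int)) (d : PySem.Dict (Int × Int) Int) (c : Int × Int),
    (l.foldl (fun d p => d.insert p.1 p.2) d).get? c
      = match lastVal? l c with
        | some w => some w
        | none => d.get? c := by
  intro l
  induction l with
  | nil => intro d c; rfl
  | cons p l ih =>
    intro d c
    rw [List.foldl_cons, ih]
    cases hl : lastVal? l c with
    | some w => simp [lastVal?, hl]
    | none =>
      by_cases h : p.1 = c
      · simp [lastVal?, hl, h]
      · have h' : ¬ c = p.1 := fun he => h he.symm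
        simp [lastVal?, hl, h, h', PySem.Dict.get?_insert]

lemma lastVal?_filter :
    ∀ (l : List ((Int × Int) × Int)) (c : Int × Int),
    lastVal? l c = lastVal? (l.filter (fun p => p.1 == c)) c := by
  intro l
  induction l with
  | nil => intro c; rfl
  | cons p l ih =>
    intro c
    by_cases h : p.1 = c
    · rw [List.filter_cons_of_pos (by simpa using h)]
      show (match lastVal? l c with
            | some w => some w
            | none => if p.1 = c then some p.2 else none) = _
      rw [ih c]
      rfl
    · rw [List.filter_cons_of_neg (by simpa using h)]
      show (match lastVal? l c with
            | some w => some w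
            | none => if p.1 = c then some p.2 else none) = lastVal? (l.filter (fun p => p.1 == c)) c
      rw [← ih c]
      cases hl : lastVal? l c with
      | some w => rfl
      | none => rw [if_neg h]

lemma K2_injective :
    Function.Injective (fun p : (Int × Int) × Int => toLex (toLex p.1, p.2)) := by
  intro p q h
  have h1 : (toLex p.1, p.2) = (toLex q.1, q.2) := toLex.injective h
  have h2 : p.1 = q.1 := toLex.injective (congrArg Prod.fst h1)
  have h3 : p.2 = q.2 := congrArg Prod.snd h1
  exact Prod.ext_iff.mpr ⟨h2, h3⟩

lemma filter_lA_eq (v : List (List Int)) (c : Int × Int) :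
    (lA v).filter (fun p => p.1 == c)
      = (PySem.List.sorted (lA v) (fun p => toLex (toLex p.1, p.2))).filter
          (fun p => p.1 == c) := by
  apply PySem.List.eq_of_perm_of_pairwise_le_of_injective
    (fun p : (Int × Int) × Int => toLex (toLex p.1, p.2)) K2_injective
  · exact List.Perm.filter _
      (PySem.List.sorted_perm (lA v) (fun p => toLex (toLex p.1, p.2)) false).symm
  · have h1 : ((lA v).filter (fun p => p.1 == c)).Pairwise (fun p q => p.2 ≤ q.2) :=
      List.Pairwise.sublist List.filter_sublist (lA_snd_mono v)
    refine List.Pairwise.imp_of_mem ?_ h1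
    intro a b ha hb hle
    have ha1 : a.1 = c := by simpa using List.of_mem_filter ha
    have hb1 : b.1 = c := by simpa using List.of_mem_filter hb
    refine Prod.Lex.le_iff.mpr (Or.inr ⟨?_, hle⟩)
    show toLex a.1 = toLex b.1
    rw [ha1, hb1]
  · exact List.Pairwise.sublist List.filter_sublist
      (PySem.List.sorted_pairwise (lA v) (fun p => toLex (toLex p.1, p.2)))

lemma lastVal_sorted_eq (v : List (List Int)) (c : Int × Int) :
    lastVal? (PySem.List.sorted (lA v) (fun p => toLex (toLex p.1, p.2))) c
      = lastVal? (lA v) c := by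
  rw [lastVal?_filter, ← filter_lA_eq, ← lastVal?_filter]

-- ---- set(…)-dedup of a list is one of its sublists ----

lemma foldl_add_sublist :
    ∀ (xs acc : List (Int × Int)),
    ∃ ys, xs.foldl PySem.Set.add acc = acc ++ ys ∧ ys.Sublist xs := by
  intro xs
  induction xs with
  | nil => intro acc; exact ⟨[], by simp, List.nil_sublist _⟩
  | cons x xs ih =>
    intro acc
    rw [List.foldl_cons]
    by_cases h : x ∈ acc
    · have hadd : PySem.Set.add acc x = acc := by simp [PySem.Set.add, h]
      rcases ih acc with ⟨ys, h1, h2⟩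
      exact ⟨ys, by rw [hadd]; exact h1, h2.cons x⟩
    · have hadd : PySem.Set.add acc x = acc ++ [x] := by simp [PySem.Set.add, h]
      rcases ih (acc ++ [x]) with ⟨ys, h1, h2⟩
      refine ⟨x :: ys, ?_, List.Sublist.cons₂ x h2⟩
      rw [hadd, h1, List.append_assoc]
      rfl

lemma ofList_sublist (xs : List (Int × Int)) : (PySem.Set.ofList xs).Sublist xs := by
  rcases foldl_add_sublist xs [] with ⟨ys, h1, h2⟩
  have h0 : PySem.Set.ofList xs = xs.foldl PySem.Set.add [] := rfl
  rw [h0, h1]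
  simpa using h2

-- ---- the two item lists ----

lemma items_foldl_char (l : List ((Int × Int) × Int)) :
    ((l.foldl (fun d p => d.insert p.1 p.2) PySem.Dict.empty).items)
      = (PySem.Set.ofList (l.map Prod.fst)).map
          (fun r => (r, (lastVal? l r).getD 0)) := by
  have hkeys : (l.foldl (fun d p => d.insert p.1 p.2) PySem.Dict.empty).keys
      = PySem.Set.ofList (l.map Prod.fst) := by
    have h0 := PySem.Dict.keys_foldl_insert_key l Prod.fst (fun _ p => p.2)
      (PySem.Dict.empty : PySem.Dict (Int × Int) Int)
    simpa using h0
  have hnd : (l.foldl (fun d p => d.insert p.1 p.2) PySem.Dict.empty).keys.Nodup := by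
    have h0 := PySem.Dict.nodup_keys_foldl_insert_key l Prod.fst (fun _ p => p.2)
      (PySem.Dict.empty : PySem.Dict (Int × Int) Int) (by decide)
    simpa using h0
  rw [PySem.Dict.items_eq_map_keys _ hnd 0, hkeys]
  apply List.map_eq_map_iff.mpr
  intro r _
  rw [PySem.Dict.getD_eq_get?_getD, get?_foldl_insert]
  cases lastVal? l r <;> rfl

lemma itemsB_pairwise (v : List (List Int)) :
    ((PySem.Set.ofList ((PySem.List.sorted (lA v)
        (fun p => toLex (toLex p.1, p.2))).map Prod.fst)).map
      (fun r => (r, (lastVal? (lA v) r).getD 0))).Pairwise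
      (fun p q => (toLex (toLex p.1, p.2) : Lex (Lex (Int × Int) × Int))
        ≤ toLex (toLex q.1, q.2)) := by
  have hsrc : ((PySem.List.sorted (lA v) (fun p => toLex (toLex p.1, p.2))).map
      Prod.fst).Pairwise (fun r r' => (toLex r : Lex (Int × Int)) ≤ toLex r') := by
    rw [List.pairwise_map]
    refine (PySem.List.sorted_pairwise (lA v) (fun p => toLex (toLex p.1, p.2))).imp ?_
    intro a b hle
    rcases Prod.Lex.le_iff.mp hle with hlt | ⟨heq, -⟩
    · exact le_of_lt hlt
    · exact le_of_eq heq
  have hle : (PySem.Set.ofList ((PySem.List.sorted (lA v)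
      (fun p => toLex (toLex p.1, p.2))).map Prod.fst)).Pairwise
      (fun r r' => (toLex r : Lex (Int × Int)) ≤ toLex r') :=
    List.Pairwise.sublist (ofList_sublist _) hsrc
  have hne : (PySem.Set.ofList ((PySem.List.sorted (lA v)
      (fun p => toLex (toLex p.1, p.2))).map Prod.fst)).Pairwise (fun r r' => r ≠ r') :=
    PySem.Set.nodup_ofList _
  rw [List.pairwise_map]
  refine (hle.and hne).imp ?_
  intro a b hab
  have hlt : (toLex a : Lex (Int × Int)) < toLex b :=
    lt_of_le_of_ne hab.1 (fun he => hab.2 (toLex.injective he))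
  exact le_of_lt (Prod.Lex.lt_iff.mpr (Or.inl hlt))

lemma items_sorted_eq (v : List (List Int)) :
    PySem.List.sorted
        (((lA v).foldl (fun d p => d.insert p.1 p.2) PySem.Dict.empty).items)
        (fun p => toLex (toLex p.1, p.2))
      = ((PySem.List.sorted (lA v) (fun p => toLex (toLex p.1, p.2))).foldl
          (fun d p => d.insert p.1 p.2) PySem.Dict.empty).items := by
  rw [items_foldl_char, items_foldl_char]
  have hlv : ∀ r : Int × Int,
      (lastVal? (PySem.List.sorted (lA v) (fun p => toLex (toLex p.1, p.2))) r).getD 0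
        = (lastVal? (lA v) r).getD 0 := fun r => by rw [lastVal_sorted_eq]
  have hfun : ((PySem.Set.ofList ((PySem.List.sorted (lA v)
      (fun p => toLex (toLex p.1, p.2))).map Prod.fst)).map
        (fun r => (r, (lastVal? (PySem.List.sorted (lA v)
          (fun p => toLex (toLex p.1, p.2))) r).getD 0)))
      = ((PySem.Set.ofList ((PySem.List.sorted (lA v)
      (fun p => toLex (toLex p.1, p.2))).map Prod.fst)).map
        (fun r => (r, (lastVal? (lA v) r).getD 0))) := by
    apply List.map_eq_map_iff.mpr
    intro r _
    rw [hlv]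
  rw [hfun]
  apply PySem.List.eq_of_perm_of_pairwise_le_of_injective
    (fun p : (Int × Int) × Int => toLex (toLex p.1, p.2)) K2_injective
  · refine (PySem.List.sorted_perm _ _ false).trans (List.Perm.map _ ?_)
    refine (List.perm_ext_iff_of_nodup (PySem.Set.nodup_ofList _)
      (PySem.Set.nodup_ofList _)).mpr ?_
    intro r
    rw [PySem.Set.mem_ofList, PySem.Set.mem_ofList]
    exact ((PySem.List.sorted_perm (lA v)
      (fun p => toLex (toLex p.1, p.2)) false).map Prod.fst).symm.mem_iff
  · exact PySem.List.sorted_pairwise _ _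
  · exact itemsB_pairwise v

-- ===== VERDICT (by name: the statement is the Claim_ definition above) =====
theorem group_to_map_spec : Claim_equal_group_to_map := by
  intro v _
  unfold Spec_group_to_map
  by_cases hv : v = []
  · subst hv; rfl
  · have hA : group_to_map v
        = (PySem.List.sorted ((PySem.List.enumerate v).foldl dictStepA
            PySem.Dict.empty).items (fun p => toLex (toLex p.1, p.2))).map
          (fun p => (p.1.1, p.1.2, p.2)) := by
      simp only [group_to_map, if_neg hv]
    have hB : group_to_map_alt v
        = ((PySem.List.sorted ([] ++ mergeGoB none
              (PySem.List.sorted (LPk v) (fun p => toLex p)))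
            (fun p => toLex (toLex p.1, p.2))).foldl
          (fun d p => d.insert p.1 p.2)
          (PySem.Dict.empty : PySem.Dict (Int × Int) Int)).items.map
          (fun p => (p.1.1, p.1.2, p.2)) := by
      simp only [group_to_map_alt]
      rw [scanB_eq_mergeGoB]
      rfl
    rw [hA, hB, List.nil_append, sorted_LPk, mergeGoB_SB, u_eq, items_sorted_eq]
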